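-- pv_equiv track=rewrite | github.com/nathansnellaert/bureau-labor-statistics | src/transforms/series_data/main.py | find_varying_columns
-- ===== SOURCE A (Python) =====
-- ALL_DIMENSIONS = [
--     "date",
--     "seasonality",
--     "area",
--     "area_type",
--     "industry",
--     "occupation",
--     "demographic_age",
--     "demographic_gender",
--     "demographic_race",
--     "demographic_education",
--     "unit",
-- ]
--
-- def find_varying_columns(records: list[dict]) -> list[str]:
--     """Find dimension columns that have more than one unique non-empty value."""
--     varying = []
--     for col in ALL_DIMENSIONS:
--         values = set()
--         for r in records:
--             v = r.get(col, "")
--             if v and v != "":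
--                 values.add(v)
--         if len(values) > 1:
--             varying.append(col)
--     return varying
-- ===== SOURCE B (Python) =====
-- ALL_DIMENSIONS = [
--     "date",
--     "seasonality",
--     "area",
--     "area_type",
--     "industry",
--     "occupation",
--     "demographic_age",
--     "demographic_gender",
--     "demographic_race",
--     "demographic_education",
--     "unit",
-- ]
--
-- def find_varying_columns(records: list[dict]) -> list[str]:
--     """Find dimension columns that have more than one unique non-empty value."""
--     first_seen = {}
--     varying = set()
--     for r in records:
--         for col in ALL_DIMENSIONS:
--             v = r.get(col, "")
--             if v:
--                 if col not in first_seen: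
--                     first_seen[col] = v
--                 elif v != first_seen[col]:
--                     varying.add(col)
--     return [c for c in ALL_DIMENSIONS if c in varying]
-- ===== Notes on version B (the rewrite author's own statement) =====
-- stated objective: alternative
-- what changed: One pass over the records (records outer, columns inner) maintaining a first-seen-value dict and a varying set instead of building a full value set per column in nested column-outer loops; output order is restored by filtering ALL_DIMENSIONS.
import Mathlib
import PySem

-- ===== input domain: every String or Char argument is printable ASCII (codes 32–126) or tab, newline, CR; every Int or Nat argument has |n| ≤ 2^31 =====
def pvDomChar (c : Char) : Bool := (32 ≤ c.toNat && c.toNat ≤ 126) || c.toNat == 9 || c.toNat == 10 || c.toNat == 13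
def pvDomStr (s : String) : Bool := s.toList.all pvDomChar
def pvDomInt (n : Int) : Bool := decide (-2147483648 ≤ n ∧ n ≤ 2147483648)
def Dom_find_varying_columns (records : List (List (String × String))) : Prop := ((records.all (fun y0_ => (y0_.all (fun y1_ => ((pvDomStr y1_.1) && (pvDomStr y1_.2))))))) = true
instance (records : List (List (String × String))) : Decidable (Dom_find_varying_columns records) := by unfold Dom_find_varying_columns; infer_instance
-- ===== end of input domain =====

-- B builds the result in ONE pass over the records (records outer, columns inner) keeping a
-- first-seen-value dict and a varying set, instead of A's column-outer loops each building a full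
-- value set; same return value, objective: alternative decomposition.

def ALL_DIMENSIONS : List String :=
  ["date", "seasonality", "area", "area_type", "industry", "occupation", "demographic_age",
   "demographic_gender", "demographic_race", "demographic_education", "unit"]

-- r.get(col, "")
def vget (r : List (String × String)) (col : String) : String :=
  (PySem.Dict.mk r).getD col ""

-- ===== PORT A =====
def find_varying_columns (records : List (List (String × String))) : List String :=
  ALL_DIMENSIONS.foldl (fun varying col =>
    let values : PySem.Set String := records.foldl (fun values r =>
      let v := vget r col
      if v ≠ "" ∧ v ≠ "" then PySem.Set.add values v else values) PySem.Set.empty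
    if 1 < values.length then varying ++ [col] else varying) []

-- ===== PORT B =====
-- the body of B's inner loop over ALL_DIMENSIONS for one record r
def bStep (r : List (String × String)) (st : PySem.Dict String String × PySem.Set String)
    (col : String) : PySem.Dict String String × PySem.Set String :=
  let v := vget r col
  if v ≠ "" then
    if st.1.contains col = false then (st.1.insert col v, st.2)
    else if v ≠ st.1.getD col "" then (st.1, PySem.Set.add st.2 col)
    else st
  else st

def find_varying_columns_alt (records : List (List (String × String))) : List String :=
  let st := records.foldl (fun st r => ALL_DIMENSIONS.foldl (bStep r) st)
    (PySem.Dict.empty, PySem.Set.empty)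
  ALL_DIMENSIONS.filter (fun c => PySem.Set.contains st.2 c)

-- ===== PRECONDITION & SPEC =====
def Spec_find_varying_columns (records : List (List (String × String))) (out : List String) : Prop := out = find_varying_columns_alt records
instance (records : List (List (String × String))) (out : List String) : Decidable (Spec_find_varying_columns records out) := by unfold Spec_find_varying_columns; infer_instance

-- ===== CLAIM (what is proved, stated in full; the proofs are below) =====
def Claim_equal_find_varying_columns : Prop := ∀ (records : List (List (String × String))), Dom_find_varying_columns records → Spec_find_varying_columns records (find_varying_columns records)

-- ===== LEMMAS AND PROOFS =====

-- abstract per-column state transition of B: (first seen value?, flagged as varying)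
def colStep (s : Option String × Bool) (v : String) : Option String × Bool :=
  if v ≠ "" then
    match s.1 with
    | none => (some v, s.2)
    | some f => (some f, s.2 || decide (v ≠ f))
  else s

-- the per-column view of B's full state
def proj (c : String) (st : PySem.Dict String String × PySem.Set String) : Option String × Bool :=
  (st.1.get? c, PySem.Set.contains st.2 c)

lemma proj_bStep (r : List (String × String)) (st : PySem.Dict String String × PySem.Set String)
    (c x : String) :
    proj c (bStep r st x) = if c = x then colStep (proj c st) (vget r x) else proj c st := by
  unfold bStep colStep proj
  by_cases hv : vget r x = ""
  · simp [hv]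
  · by_cases hc : st.1.contains x
    · rcases h : st.1.get? x with _ | f
      · exact absurd ((PySem.Dict.get?_eq_none_iff_contains st.1 x).1 h) (by simp [hc])
      · by_cases hcx : c = x
        · subst hcx
          by_cases hne : vget r c = f <;>
            simp [hv, hc, h, PySem.Dict.getD_eq_get?_getD, hne, PySem.Set.mem_add]
        · by_cases hne : vget r x = f <;>
            simp [hv, hc, h, PySem.Dict.getD_eq_get?_getD, hne, hcx]
    · simp at hc
      have hg : st.1.get? x = none := (PySem.Dict.get?_eq_none_iff_contains st.1 x).2 hc
      by_cases hcx : c = x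
      · subst hcx
        simp [hv, hc, hg]
      · simp [hv, hc, hcx, PySem.Dict.get?_insert]

lemma proj_inner (r : List (String × String)) (cols : List String) (c : String)
    (st : PySem.Dict String String × PySem.Set String) (hnd : cols.Nodup) :
    proj c (cols.foldl (bStep r) st) =
      if c ∈ cols then colStep (proj c st) (vget r c) else proj c st := by
  induction cols generalizing st with
  | nil => simp
  | cons x t ih =>
    rcases List.nodup_cons.1 hnd with ⟨hx, hnd'⟩
    simp only [List.foldl_cons]
    rw [ih _ hnd']
    by_cases hcx : c = x
    · subst hcx
      simp [hx, proj_bStep]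
    · by_cases hct : c ∈ t <;> simp [hcx, hct, proj_bStep]

lemma proj_outer (records : List (List (String × String))) (c : String)
    (hc : c ∈ ALL_DIMENSIONS) (st : PySem.Dict String String × PySem.Set String) :
    proj c (records.foldl (fun st r => ALL_DIMENSIONS.foldl (bStep r) st) st) =
      (records.map (fun r => vget r c)).foldl colStep (proj c st) := by
  induction records generalizing st with
  | nil => simp
  | cons r rs ih =>
    simp only [List.foldl_cons, List.map_cons]
    rw [ih, proj_inner r ALL_DIMENSIONS c st (by decide), if_pos hc]

-- B's per-column flag as a predicate on the (already filtered) value list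
def Qpred : List String → Bool
  | [] => false
  | x :: t => t.any (fun v => decide (v ≠ x))

lemma colStep_some (t : List String) (f : String) (b : Bool) :
    (t.foldl colStep (some f, b)) =
      (some f, b || t.any (fun v => decide (v ≠ "") && decide (v ≠ f))) := by
  induction t generalizing b with
  | nil => simp
  | cons v t ih =>
    simp only [List.foldl_cons, List.any_cons]
    by_cases hv : v = ""
    · simp [colStep, hv, ih]
    · by_cases hvf : v = f
      · simp [colStep, hvf, ih]
      · simp [colStep, hv, hvf, ih]

lemma flagQ (F : List String) (hF : ∀ v ∈ F, ¬ v = "") :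
    (F.foldl colStep (none, false)).2 = Qpred F := by
  cases F with
  | nil => rfl
  | cons x t =>
    have hx : ¬ x = "" := hF x (by simp)
    simp only [List.foldl_cons]
    have h1 : colStep (none, false) x = (some x, false) := by simp [colStep, hx]
    rw [h1, colStep_some]
    simp only [Qpred, Bool.false_or]
    rw [Bool.eq_iff_iff]
    simp only [List.any_eq_true, Bool.and_eq_true, decide_eq_true_eq]
    constructor
    · rintro ⟨v, hv, _, h2⟩; exact ⟨v, hv, h2⟩
    · rintro ⟨v, hv, h2⟩; exact ⟨v, hv, hF v (by simp [hv]), h2⟩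

lemma setlenQ (F : List String) :
    1 < (PySem.Set.ofList F : List String).length ↔ Qpred F = true := by
  cases F with
  | nil => simp [PySem.Set.ofList, Qpred]
  | cons x t =>
    rw [PySem.Set.ofList_cons]
    simp only [List.length_cons, Qpred, List.any_eq_true, decide_eq_true_eq]
    constructor
    · intro h
      have hpos : 0 < ((PySem.Set.ofList t).discard x).length := by omega
      rcases List.exists_mem_of_length_pos hpos with ⟨y, hy⟩
      rcases (PySem.Set.mem_discard _ _ _).1 hy with ⟨hyt, hyx⟩
      exact ⟨y, (PySem.Set.mem_ofList _ _).1 hyt, hyx⟩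
    · rintro ⟨y, hy, hyx⟩
      have : y ∈ (PySem.Set.ofList t).discard x :=
        (PySem.Set.mem_discard _ _ _).2 ⟨(PySem.Set.mem_ofList _ _).2 hy, hyx⟩
      have := List.length_pos_of_mem this
      omega

-- ===== VERDICT (by name: the statement is the Claim_ definition above) =====
theorem find_varying_columns_spec : Claim_equal_find_varying_columns := by
  intro records _
  show find_varying_columns records = find_varying_columns_alt records
  have hfunA : (fun (s : PySem.Set String) v => if v ≠ "" ∧ v ≠ "" then PySem.Set.add s v else s)
      = (fun (s : PySem.Set String) v => if (decide (v ≠ "")) = true then PySem.Set.add s v else s) := by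
    funext s v; by_cases h : v = "" <;> simp [h]
  have hfunB : (fun (s : Option String × Bool) v => if (decide (v ≠ "")) = true then colStep s v else s)
      = colStep := by
    funext s v; by_cases h : v = "" <;> simp [colStep, h]
  have hA : find_varying_columns records =
      List.filter (fun col => decide (1 < ((records.foldl (fun values r =>
        if vget r col ≠ "" ∧ vget r col ≠ "" then PySem.Set.add values (vget r col) else values)
        (PySem.Set.empty : PySem.Set String)).length))) ALL_DIMENSIONS :=
    PySem.List.foldl_append_ite_eq_filter _ ALL_DIMENSIONS []
  rw [hA]
  show _ = ALL_DIMENSIONS.filter (fun c => PySem.Set.contains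
    (records.foldl (fun st r => ALL_DIMENSIONS.foldl (bStep r) st)
      (PySem.Dict.empty, PySem.Set.empty)).2 c)
  apply List.filter_congr
  intro c hc
  -- name the per-column value list and its nonempty filtration
  set F : List String := (records.map (fun r => vget r c)).filter (fun v => decide (v ≠ "")) with hF
  have hFne : ∀ v ∈ F, ¬ v = "" := by
    intro v hv
    have := (List.mem_filter.1 hv).2
    simpa using this
  -- A's side equals decide (Qpred F)
  have hAinner : (records.foldl (fun values r =>
        if vget r c ≠ "" ∧ vget r c ≠ "" then PySem.Set.add values (vget r c) else values)
        (PySem.Set.empty : PySem.Set String)) = PySem.Set.ofList F := by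
    have e1 : (List.foldl (fun values r =>
          if vget r c ≠ "" ∧ vget r c ≠ "" then PySem.Set.add values (vget r c) else values)
          (PySem.Set.empty : PySem.Set String) records)
        = List.foldl (fun s v => if v ≠ "" ∧ v ≠ "" then PySem.Set.add s v else s)
          (PySem.Set.empty : PySem.Set String) (records.map (fun r => vget r c)) :=
      (List.foldl_map (f := fun r => vget r c)
        (g := fun (s : PySem.Set String) v => if v ≠ "" ∧ v ≠ "" then PySem.Set.add s v else s)).symm
    rw [e1, hfunA, ← List.foldl_filter, ← hF]
    exact (PySem.Set.ofList_eq_foldl F).symm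
  -- B's side equals Qpred F
  have hB : PySem.Set.contains
      (records.foldl (fun st r => ALL_DIMENSIONS.foldl (bStep r) st)
        (PySem.Dict.empty, PySem.Set.empty)).2 c = Qpred F := by
    have hproj : proj c (PySem.Dict.empty, PySem.Set.empty) = (none, false) := by
      simp [proj, PySem.Dict.get?_empty, PySem.Set.contains_eq_listContains, PySem.Set.empty]
    have h1 := proj_outer records c hc (PySem.Dict.empty, PySem.Set.empty)
    rw [hproj] at h1
    have h2 : ((records.map (fun r => vget r c)).foldl colStep (none, false)).2 = Qpred F := by
      rw [← hfunB, ← List.foldl_filter, ← hF]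
      · exact flagQ F hFne
    have h3 := congrArg Prod.snd h1
    simp only [proj] at h3
    rw [h3, h2]
  rw [hAinner, hB, Bool.eq_iff_iff, decide_eq_true_eq, setlenQ]
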